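-- pv_equiv track=rewrite | github.com/Santi2065/Tp_Final_Sierra | tpf_Montana_dashboard.py | leaderboard_general
-- ===== SOURCE A (Python) =====
-- def leaderboard_general(diccionario:dict)->str:
--     """
--     Cadena de jugadores ordenados por altura.
--
--     Argumento de entrada:
--         diccionario: Diccionario que contiene los datos de todos los jugadores.
--
--     Salida:
--         cadena con los jugadores ordenados ascendentemente respecto a su altura.
--     """
--
--     jugadores_ordenados = []
--     for equipo, jugadores in diccionario.items():
--         for jugador, variables in jugadores.items():
--             altura = variables.get("z", 0)
--             jugadores_ordenados.append((equipo, jugador, altura))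
--
--     """Insertion sort"""
--     n = len(jugadores_ordenados)
--     for i in range(1, n):
--         actual = jugadores_ordenados[i]
--         j = i - 1
--         while j >= 0 and actual[2] > jugadores_ordenados[j][2]:
--             jugadores_ordenados[j + 1] = jugadores_ordenados[j]
--             j -= 1
--         jugadores_ordenados[j + 1] = actual
--
--     lista_ordenada = []
--     for idx, player in enumerate(jugadores_ordenados, 1):
--         lista_ordenada.append(f"{idx}- {player[1]} de {player[0]}")
--
--     return "\n".join(lista_ordenada)
-- ===== SOURCE B (Python) =====
-- def leaderboard_general(diccionario: dict) -> str:
--     """Flatten once with a comprehension, sort with the built-in stable sort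
--     (reverse=True keeps the original order of equal heights, exactly like the
--     strict-'>' insertion sort), and join the formatted lines."""
--     jugadores = [
--         (equipo, jugador, variables.get("z", 0))
--         for equipo, plantel in diccionario.items()
--         for jugador, variables in plantel.items()
--     ]
--     orden = sorted(jugadores, key=lambda t: t[2], reverse=True)
--     return "\n".join(
--         f"{idx}- {jugador} de {equipo}"
--         for idx, (equipo, jugador, _altura) in enumerate(orden, 1)
--     )
-- ===== Notes on version B (the rewrite author's own statement) =====
-- stated objective: idiomatic
-- what changed: Replaces the hand-written insertion sort (index shifts via range/while loops) and append-loops with a single flattening comprehension, Python's built-in stable sorted(..., reverse=True), and a join over a generator.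
import Mathlib
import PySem

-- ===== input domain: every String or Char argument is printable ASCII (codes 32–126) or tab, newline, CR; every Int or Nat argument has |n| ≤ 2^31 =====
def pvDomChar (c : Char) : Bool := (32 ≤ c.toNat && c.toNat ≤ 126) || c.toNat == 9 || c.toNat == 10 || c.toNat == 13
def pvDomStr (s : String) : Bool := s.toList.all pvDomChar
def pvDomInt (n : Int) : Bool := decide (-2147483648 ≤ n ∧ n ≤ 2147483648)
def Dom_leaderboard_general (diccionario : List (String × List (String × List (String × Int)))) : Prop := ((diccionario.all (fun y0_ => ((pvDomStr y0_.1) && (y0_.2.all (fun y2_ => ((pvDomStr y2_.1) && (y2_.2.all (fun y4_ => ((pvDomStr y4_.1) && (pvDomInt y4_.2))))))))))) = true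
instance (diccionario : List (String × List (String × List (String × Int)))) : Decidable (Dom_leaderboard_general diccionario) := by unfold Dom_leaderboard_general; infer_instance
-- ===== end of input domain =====

-- B replaces A's hand-written insertion sort and append-loops with one flattening
-- comprehension, the built-in stable sort (reverse=True), and a join over a map (objective: idiomatic).


-- ===== PORT A =====
-- default element used only to totalise pyGetD/pySetD (A's indices are always in range)
def lgDef : String × String × Int := ("", "", 0)

-- A's inner 'while j >= 0 and actual[2] > jugadores_ordenados[j][2]' shifting loop
def lgShift (arr : List (String × String × Int)) (actual : String × String × Int) (j : Int) :
    List (String × String × Int) :=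
  if h : 0 ≤ j ∧ (PySem.List.pyGetD arr j lgDef).2.2 < actual.2.2 then
    lgShift (PySem.List.pySetD arr (j + 1) (PySem.List.pyGetD arr j lgDef)) actual (j - 1)
  else
    PySem.List.pySetD arr (j + 1) actual
termination_by (j + 1).toNat
decreasing_by omega

def leaderboard_general (diccionario : List (String × List (String × List (String × Int)))) : String :=
  let jugadores_ordenados := diccionario.foldl (fun acc eq =>
      eq.2.foldl (fun acc2 jv => acc2 ++ [(eq.1, jv.1, PySem.Dict.getD (PySem.Dict.mk jv.2) "z" 0)]) acc) []
  let n : Int := PySem.List.len jugadores_ordenados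
  let arr := (PySem.List.pyRange 1 n).foldl (fun arr i =>
      lgShift arr (PySem.List.pyGetD arr i lgDef) (i - 1)) jugadores_ordenados
  let lista_ordenada := (PySem.List.enumerate arr 1).foldl (fun acc p =>
      acc ++ [PySem.Int.toStr p.1 ++ "- " ++ p.2.2.1 ++ " de " ++ p.2.1]) []
  PySem.Str.join "\n" lista_ordenada

-- ===== PORT B =====
def leaderboard_general_alt (diccionario : List (String × List (String × List (String × Int)))) : String :=
  let jugadores := diccionario.flatMap (fun ep =>
      ep.2.map (fun jv => (ep.1, jv.1, PySem.Dict.getD (PySem.Dict.mk jv.2) "z" 0)))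
  let orden := PySem.List.sorted jugadores (fun t => t.2.2) true
  PySem.Str.join "\n" ((PySem.List.enumerate orden 1).map (fun p =>
      PySem.Int.toStr p.1 ++ "- " ++ p.2.2.1 ++ " de " ++ p.2.1))

-- ===== PRECONDITION & SPEC =====
def Spec_leaderboard_general (diccionario : List (String × List (String × List (String × Int)))) (out : String) : Prop := out = leaderboard_general_alt diccionario
instance (diccionario : List (String × List (String × List (String × Int)))) (out : String) : Decidable (Spec_leaderboard_general diccionario out) := by unfold Spec_leaderboard_general; infer_instance

-- ===== CLAIM (what is proved, stated in full; the proofs are below) =====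
def Claim_equal_leaderboard_general : Prop := ∀ (diccionario : List (String × List (String × List (String × Int)))), Dom_leaderboard_general diccionario → Spec_leaderboard_general diccionario (leaderboard_general diccionario)

-- ===== LEMMAS AND PROOFS =====
-- the comparison A's insertion sort orders by (= PySem.List.sorted's `before` for reverse=True)
def lgBefore (a b : String × String × Int) : Bool := decide (b.2.2 < a.2.2)

-- insertBy passes an element it would insert before over a final [w] untouched
theorem lgInsertBy_append_of_before (x w : String × String × Int)
    (U : List (String × String × Int)) (h : lgBefore x w = true) :
    PySem.List.insertBy lgBefore x (U ++ [w]) = PySem.List.insertBy lgBefore x U ++ [w] := by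
  induction U with
  | nil => simp [PySem.List.insertBy, h]
  | cons u U ih =>
    by_cases hu : lgBefore x u = true <;> simp [PySem.List.insertBy, hu, ih]

-- A's right-to-left shifting loop over a descending prefix S (slot z holds junk) is insertBy
theorem lgShift_spec (S : List (String × String × Int)) (z : String × String × Int)
    (rest : List (String × String × Int)) (actual : String × String × Int)
    (hS : S.Pairwise (fun a b => b.2.2 ≤ a.2.2)) :
    lgShift (S ++ z :: rest) actual ((S.length : Int) - 1) =
      PySem.List.insertBy lgBefore actual S ++ rest := by
  induction S using List.reverseRecOn generalizing z rest with
  | nil =>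
    rw [lgShift]
    simp [PySem.List.insertBy, PySem.List.pySetD_of_nonneg]
  | append_singleton U w ih =>
    have hw : PySem.List.pyGetD ((U ++ [w]) ++ z :: rest) ((((U ++ [w]).length : Int)) - 1) lgDef = w := by
      have : ((((U ++ [w]).length : Int)) - 1) = (U.length : Int) := by simp
      rw [this, PySem.List.pyGetD_natCast]
      simp
    rw [lgShift]
    by_cases hcond : w.2.2 < actual.2.2
    · rw [dif_pos ⟨by simp only [List.length_append, List.length_cons, List.length_nil]; omega,
        by rw [hw]; exact hcond⟩]
      rw [hw]
      have harr : PySem.List.pySetD ((U ++ [w]) ++ z :: rest) ((((U ++ [w]).length : Int)) - 1 + 1) w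
          = U ++ w :: w :: rest := by
        have h1 : ((((U ++ [w]).length : Int)) - 1 + 1) = ((U.length + 1 : Nat) : Int) := by simp
        rw [h1, PySem.List.pySetD_natCast]
        simp
      rw [harr]
      have h2 : ((((U ++ [w]).length : Int)) - 1 - 1) = ((U.length : Int) - 1) := by simp
      rw [h2]
      rw [ih w (w :: rest) (hS.sublist (by simp))]
      rw [lgInsertBy_append_of_before actual w U (by simp [lgBefore, hcond])]
      simp
    · rw [dif_neg (by rw [hw]; intro hc; exact hcond hc.2)]
      have h1 : ((((U ++ [w]).length : Int)) - 1 + 1) = (((U ++ [w]).length : Nat) : Int) := by simp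
      rw [h1, PySem.List.pySetD_natCast]
      have hins : PySem.List.insertBy lgBefore actual (U ++ [w]) = (U ++ [w]) ++ [actual] := by
        apply PySem.List.insertBy_of_forall_not_before
        intro y hy
        simp [lgBefore]
        rcases List.mem_append.1 hy with hyU | hyw
        · have hwy : w.2.2 ≤ y.2.2 := by
            have := List.pairwise_append.1 hS
            exact this.2.2 y hyU w (by simp)
          omega
        · simp at hyw; subst hyw; omega
      rw [hins]
      simp

-- the outer 'for i in range(1, n)' loop: sorted prefix ++ unprocessed tail → full sort
theorem lgSort_loop (R pre : List (String × String × Int)) :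
    (PySem.List.pyRange (pre.length : Int) ((pre.length : Int) + (R.length : Int))).foldl
        (fun arr i => lgShift arr (PySem.List.pyGetD arr i lgDef) (i - 1))
        (PySem.List.sorted pre (fun t => t.2.2) true ++ R) =
      PySem.List.sorted (pre ++ R) (fun t => t.2.2) true := by
  induction R generalizing pre with
  | nil => simp [pysem]
  | cons r R ih =>
    have hlt : (pre.length : Int) < (pre.length : Int) + ((r :: R).length : Int) := by
      simp only [List.length_cons]; push_cast; omega
    rw [PySem.List.pyRange_one_cons hlt, List.foldl_cons]
    have hget : PySem.List.pyGetD (PySem.List.sorted pre (fun t => t.2.2) true ++ r :: R)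
        ((pre.length : Int)) lgDef = r := by
      rw [PySem.List.pyGetD_natCast]
      simp [PySem.List.length_sorted]
    rw [hget]
    have hlen : (pre.length : Int) - 1 = (((PySem.List.sorted pre (fun t => t.2.2) true).length : Int)) - 1 := by
      rw [PySem.List.length_sorted]
    rw [hlen, lgShift_spec _ _ _ _ (PySem.List.sorted_pairwise_rev pre (fun t => t.2.2))]
    have hins : PySem.List.insertBy lgBefore r (PySem.List.sorted pre (fun t => t.2.2) true) =
        PySem.List.sorted (pre ++ [r]) (fun t => t.2.2) true := by
      rw [PySem.List.sorted_rev_eq_foldl_insertBy (pre ++ [r]), List.foldl_append, List.foldl_cons,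
        List.foldl_nil, ← PySem.List.sorted_rev_eq_foldl_insertBy pre]
      rfl
    rw [hins]
    have hidx1 : (pre.length : Int) + 1 = (((pre ++ [r]).length : Nat) : Int) := by simp
    have hidx2 : (pre.length : Int) + ((r :: R).length : Int)
        = (((pre ++ [r]).length : Nat) : Int) + (R.length : Int) := by
      simp only [List.length_cons, List.length_append, List.length_nil]; push_cast; ring
    rw [hidx1, hidx2, ih (pre ++ [r])]
    simp

-- A's whole insertion sort equals Python's stable sorted(..., reverse=True)
theorem lgSort_eq (xs : List (String × String × Int)) :
    (PySem.List.pyRange 1 (PySem.List.len xs)).foldl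
        (fun arr i => lgShift arr (PySem.List.pyGetD arr i lgDef) (i - 1)) xs =
      PySem.List.sorted xs (fun t => t.2.2) true := by
  cases xs with
  | nil => simp [pysem]
  | cons x t =>
    have h := lgSort_loop t [x]
    simp only [List.length_cons, List.length_nil, Nat.cast_one, zero_add,
      List.singleton_append] at h
    have hn : PySem.List.len (x :: t) = 1 + (t.length : Int) := by
      simp [pysem]; ring
    rw [hn]
    have hs : PySem.List.sorted [x] (fun t => t.2.2) true ++ t = x :: t := rfl
    rw [hs] at h
    exact h

-- ===== VERDICT (by name: the statement is the Claim_ definition above) =====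
theorem leaderboard_general_spec : Claim_equal_leaderboard_general := by
  intro d _
  unfold Spec_leaderboard_general leaderboard_general leaderboard_general_alt
  simp only [PySem.List.foldl_append_singleton_eq_map, PySem.List.foldl_append_eq_flatMap,
    List.nil_append, lgSort_eq]
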